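-- pv_equiv track=rewrite | github.com/pkanumula/Leetcode | 1333-sort-the-jumbled-numbers/1333-sort-the-jumbled-numbers.py | sortJumbled
-- ===== SOURCE A (Python) =====
-- def sortJumbled(mapping, nums):
--     """
--     :type mapping: List[int]
--     :type nums: List[int]
--     :rtype: List[int]
--     """
--     def get_mapped_value(num):
--         if num == 0:
--             return mapping[0]
--
--         mapped = 0
--         multiplier = 1
--         while num:
--             digit = num % 10
--             mapped += mapping[digit] * multiplier
--             multiplier *= 10
--             num //= 10
--         return mapped
--
--     # Create a list of tuples: (original index, original number, mapped value)
--     indexed_nums = [(i, num, get_mapped_value(num)) for i, num in enumerate(nums)]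
--
--     # Sort the list based on mapped value and original index
--     indexed_nums.sort(key=lambda x: (x[2], x[0]))
--
--     # Extract the sorted original numbers
--     return [num for _, num, _ in indexed_nums]
-- ===== SOURCE B (Python) =====
-- def sortJumbled(mapping, nums):
--     def mapped(num):
--         v = 0
--         for ch in str(num):
--             v = 10 * v + mapping[int(ch)]
--         return v
--     return sorted(nums, key=mapped)
-- ===== Notes on version B (the rewrite author's own statement) =====
-- stated objective: idiomatic
-- what changed: B computes each mapped value left-to-right by Horner's rule over the decimal string instead of A's right-to-left modulo/multiplier arithmetic, and returns sorted(nums, key=mapped), relying on sort stability instead of A's explicit (index, num, value) decoration with an index tiebreak.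
import Mathlib
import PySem

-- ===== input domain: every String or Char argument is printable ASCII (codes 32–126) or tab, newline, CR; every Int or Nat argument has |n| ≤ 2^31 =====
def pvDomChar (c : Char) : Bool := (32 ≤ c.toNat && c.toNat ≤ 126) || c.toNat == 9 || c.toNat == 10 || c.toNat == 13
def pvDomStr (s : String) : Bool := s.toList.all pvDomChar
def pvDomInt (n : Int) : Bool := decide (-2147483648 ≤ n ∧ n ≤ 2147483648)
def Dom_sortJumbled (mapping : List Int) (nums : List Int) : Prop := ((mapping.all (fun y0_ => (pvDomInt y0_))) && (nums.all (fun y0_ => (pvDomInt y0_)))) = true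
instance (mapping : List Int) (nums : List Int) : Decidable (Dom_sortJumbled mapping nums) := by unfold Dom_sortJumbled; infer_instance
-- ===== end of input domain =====

-- B maps each number through the digit mapping by Horner's rule over its decimal string and
-- returns sorted(nums, key=mapped), relying on sort stability instead of A's explicit
-- (index, num, value) decoration with an index tiebreak; same cost, more idiomatic.

-- ===== PORT A =====
-- the 'while num:' loop of get_mapped_value, with fuel (num strictly shrinks under //10 for num > 0)
def sortJumbledLoop (mapping : List Int) : Nat → Int → Int → Int → Int
  | 0, _, mapped, _ => mapped
  | f + 1, num, mapped, mult =>
    if num = 0 then mapped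
    else
      sortJumbledLoop mapping f (PySem.Int.floordiv num 10)
        (mapped + (PySem.List.pyGet? mapping (PySem.Int.mod num 10)).getD 0 * mult) (mult * 10)

def sortJumbledGMV (mapping : List Int) (num : Int) : Int :=
  if num = 0 then (PySem.List.pyGet? mapping 0).getD 0
  else sortJumbledLoop mapping (num.toNat + 1) num 0 1

def sortJumbled (mapping : List Int) (nums : List Int) : List Int :=
  let indexed := (PySem.List.enumerate nums).map (fun p => (p.1, p.2, sortJumbledGMV mapping p.2))
  (PySem.List.sorted2 indexed (fun x => x.2.2) (fun x => x.1)).map (fun x => x.2.1)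

-- ===== PORT B =====
-- mapped(num): v = 0; for ch in str(num): v = 10*v + mapping[int(ch)]
def sortJumbledKey (mapping : List Int) (num : Int) : Int :=
  (PySem.Int.toStr num).toList.foldl
    (fun v ch => 10 * v + (PySem.List.pyGet? mapping ((PySem.Int.ofChars? [ch]).getD 0)).getD 0) 0

def sortJumbled_alt (mapping : List Int) (nums : List Int) : List Int :=
  PySem.List.sorted nums (sortJumbledKey mapping)

-- ===== PRECONDITION & SPEC =====
-- exactly the inputs on which the Python A returns: a negative element makes A's while-loop
-- diverge, and a decimal digit ≥ len(mapping) (or the number 0 with an empty mapping) raises IndexError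
def Pre_sortJumbled (mapping : List Int) (nums : List Int) : Prop :=
  ∀ n ∈ nums, 0 ≤ n ∧ (n = 0 → mapping ≠ []) ∧
    ∀ d ∈ Nat.digits 10 n.toNat, d < mapping.length

instance (mapping : List Int) (nums : List Int) : Decidable (Pre_sortJumbled mapping nums) := by
  unfold Pre_sortJumbled; infer_instance

def pvWitness_sortJumbled : List Int × List Int :=
  ([8, 9, 4, 0, 2, 1, 3, 5, 7, 6], [991, 338, 38, 0])

def Spec_sortJumbled (mapping : List Int) (nums : List Int) (out : List Int) : Prop := out = sortJumbled_alt mapping nums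
instance (mapping : List Int) (nums : List Int) (out : List Int) : Decidable (Spec_sortJumbled mapping nums out) := by unfold Spec_sortJumbled; infer_instance

-- ===== CLAIM (what is proved, stated in full; the proofs are below) =====
def Claim_equal_sortJumbled : Prop := ∀ (mapping : List Int) (nums : List Int), Dom_sortJumbled mapping nums → Pre_sortJumbled mapping nums → Spec_sortJumbled mapping nums (sortJumbled mapping nums)

-- ===== LEMMAS AND PROOFS =====

-- the common mapped value, digit by digit (proof helper)
def mval (mapping : List Int) (n : Nat) : Int :=
  if n < 10 then (PySem.List.pyGet? mapping (n : Int)).getD 0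
  else (PySem.List.pyGet? mapping ((n % 10 : Nat) : Int)).getD 0 + 10 * mval mapping (n / 10)
  decreasing_by exact Nat.div_lt_self (by omega) (by omega)

theorem loop_eq_mval (mapping : List Int) :
    ∀ f (n : Nat), 0 < n → n ≤ f → ∀ mapped mult,
      sortJumbledLoop mapping f (n : Int) mapped mult = mapped + mult * mval mapping n := by
  intro f
  induction f with
  | zero => intro n h1 h2; omega
  | succ f ih =>
    intro n h1 h2 mapped mult
    have hne : (n : Int) ≠ 0 := by exact_mod_cast h1.ne'
    have hmod : PySem.Int.mod (n : Int) 10 = ((n % 10 : Nat) : Int) :=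
      by exact_mod_cast PySem.Int.mod_natCast n 10
    have hdiv : PySem.Int.floordiv (n : Int) 10 = ((n / 10 : Nat) : Int) :=
      by exact_mod_cast PySem.Int.floordiv_natCast n 10
    rw [sortJumbledLoop, if_neg hne, hmod, hdiv]
    by_cases h10 : n < 10
    · have hq : n / 10 = 0 := Nat.div_eq_of_lt h10
      rw [hq]
      have : sortJumbledLoop mapping f ((0:Nat) : Int)
          (mapped + (PySem.List.pyGet? mapping ((n % 10 : Nat) : Int)).getD 0 * mult) (mult * 10)
          = mapped + (PySem.List.pyGet? mapping ((n % 10 : Nat) : Int)).getD 0 * mult := by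
        cases f with
        | zero => rw [sortJumbledLoop]
        | succ f => rw [sortJumbledLoop, if_pos]; rfl
      rw [this, mval, if_pos h10, Nat.mod_eq_of_lt h10]
      ring
    · have hqpos : 0 < n / 10 := Nat.div_pos (by omega) (by omega)
      have hqle : n / 10 ≤ f := by
        have h2' : n / 10 < n := Nat.div_lt_self h1 (by omega)
        omega
      rw [ih (n / 10) hqpos hqle]
      conv_rhs => rw [mval]
      rw [if_neg h10]
      ring

theorem tdc_acc : ∀ (f n : Nat) (acc : List Char),
    Nat.toDigitsCore 10 f n acc = Nat.toDigitsCore 10 f n [] ++ acc := by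
  intro f
  induction f with
  | zero => intro n acc; rfl
  | succ f ih =>
    intro n acc
    rw [Nat.toDigitsCore, Nat.toDigitsCore]
    by_cases h : n / 10 = 0
    · simp [h]
    · simp only [h, if_false]
      rw [ih (n / 10) ((n % 10).digitChar :: acc), ih (n / 10) [(n % 10).digitChar]]
      simp

theorem tdc_fuel : ∀ (f : Nat), ∀ (g n : Nat), n < f → n < g →
    Nat.toDigitsCore 10 f n [] = Nat.toDigitsCore 10 g n [] := by
  intro f
  induction f with
  | zero => intro g n h1; omega
  | succ f ih =>
    intro g n h1 h2
    cases g with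
    | zero => omega
    | succ g =>
      rw [Nat.toDigitsCore, Nat.toDigitsCore]
      by_cases h : n / 10 = 0
      · simp [h]
      · simp only [h, if_false]
        rw [tdc_acc f, tdc_acc g]
        have hn : 0 < n := by
          rcases Nat.eq_zero_or_pos n with h0 | h0
          · exfalso; apply h; simp [h0]
          · exact h0
        have hlt : n / 10 < n := Nat.div_lt_self hn (by omega)
        rw [ih g (n / 10) (by omega) (by omega)]

theorem toDigits_lt {n : Nat} (h : n < 10) : Nat.toDigits 10 n = [Nat.digitChar n] := by
  rw [Nat.toDigits, Nat.toDigitsCore]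
  simp [Nat.div_eq_of_lt h, Nat.mod_eq_of_lt h]

theorem toDigits_split {n : Nat} (h : 10 ≤ n) :
    Nat.toDigits 10 n = Nat.toDigits 10 (n / 10) ++ [Nat.digitChar (n % 10)] := by
  rw [Nat.toDigits, Nat.toDigitsCore]
  have h' : n / 10 ≠ 0 := by
    have := Nat.div_le_div_right (c := 10) h
    simp at this; omega
  simp only [h', if_false]
  rw [tdc_acc n, Nat.toDigits]
  have hlt : n / 10 < n := Nat.div_lt_self (by omega) (by omega)
  rw [tdc_fuel n (n / 10 + 1) (n / 10) (by omega) (by omega)]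

theorem ofChars_digitChar {d : Nat} (h : d < 10) :
    (PySem.Int.ofChars? [Nat.digitChar d]).getD 0 = (d : Int) := by
  interval_cases d <;> decide

theorem toChars_natCast (n : Nat) : PySem.Int.toChars (n : Int) = Nat.toDigits 10 n := by
  rw [PySem.Int.toChars]
  simp

theorem horner_mval (mapping : List Int) : ∀ (n : Nat),
    (Nat.toDigits 10 n).foldl
      (fun v ch => 10 * v + (PySem.List.pyGet? mapping ((PySem.Int.ofChars? [ch]).getD 0)).getD 0) 0
      = mval mapping n := by
  intro n
  induction n using Nat.strong_induction_on with
  | _ n ih =>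
    by_cases h : n < 10
    · rw [toDigits_lt h, mval, if_pos h]
      simp [ofChars_digitChar h]
    · rw [toDigits_split (by omega), List.foldl_append,
        ih (n / 10) (Nat.div_lt_self (by omega) (by omega))]
      conv_rhs => rw [mval]
      rw [if_neg h]
      simp only [List.foldl_cons, List.foldl_nil]
      simp [ofChars_digitChar (Nat.mod_lt n (by omega))]
      ring

theorem horner_eq_mval (mapping : List Int) (n : Nat) :
    sortJumbledKey mapping (n : Int) = mval mapping n := by
  rw [sortJumbledKey, PySem.Int.toList_toStr, toChars_natCast]
  exact horner_mval mapping n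

theorem gmv_eq_key (mapping : List Int) (num : Int) (h : 0 ≤ num) :
    sortJumbledGMV mapping num = sortJumbledKey mapping num := by
  obtain ⟨m, rfl⟩ : ∃ m : Nat, num = (m : Int) := ⟨num.toNat, (Int.toNat_of_nonneg h).symm⟩
  rw [horner_eq_mval]
  rcases Nat.eq_zero_or_pos m with h0 | h0
  · subst h0
    rw [sortJumbledGMV, if_pos (by norm_num), mval, if_pos (by omega)]
    norm_num
  · rw [sortJumbledGMV, if_neg (by exact_mod_cast h0.ne'),
      loop_eq_mval mapping ((m : Int).toNat + 1) m h0 (by omega)]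
    ring

theorem insert_proj (k : Int → Int) (x : Int × Int × Int) :
    ∀ (acc : List (Int × Int × Int)), x.2.2 = k x.2.1 → (∀ y ∈ acc, y.2.2 = k y.2.1) →
    (∀ y ∈ acc, y.1 < x.1) →
    (PySem.List.insertBy
        (fun a b => decide (a.2.2 < b.2.2) || (!decide (b.2.2 < a.2.2) && decide (a.1 < b.1)))
        x acc).map (fun p => p.2.1)
      = PySem.List.insertBy (fun a b => decide (k a < k b)) x.2.1 (acc.map (fun p => p.2.1)) := by
  intro acc
  induction acc with
  | nil => intro _ _ _; rfl
  | cons y ys ih =>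
    intro hx hkeys hidx
    have hky : y.2.2 = k y.2.1 := hkeys y (by simp)
    have hyx : y.1 < x.1 := hidx y (by simp)
    have hbe : (decide (x.2.2 < y.2.2) || (!decide (y.2.2 < x.2.2) && decide (x.1 < y.1)))
        = decide (k x.2.1 < k y.2.1) := by
      rw [hx, hky]
      by_cases h : k x.2.1 < k y.2.1
      · simp [h]
      · simp [h]; omega
    rw [PySem.List.insertBy, List.map_cons, PySem.List.insertBy]
    rw [hbe]
    by_cases h : k x.2.1 < k y.2.1
    · simp [h]
    · simp only [h, decide_false, Bool.false_eq_true, if_false, List.map_cons, List.cons.injEq, true_and]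
      exact ih hx (fun z hz => hkeys z (by simp [hz])) (fun z hz => hidx z (by simp [hz]))

theorem foldl_proj (k : Int → Int) :
    ∀ (l acc : List (Int × Int × Int)),
    (∀ z ∈ l, z.2.2 = k z.2.1) → (∀ y ∈ acc, y.2.2 = k y.2.1) →
    (∀ y ∈ acc, ∀ z ∈ l, y.1 < z.1) → l.Pairwise (fun a b => a.1 < b.1) →
    (l.foldl (fun acc x => PySem.List.insertBy
        (fun a b => decide (a.2.2 < b.2.2) || (!decide (b.2.2 < a.2.2) && decide (a.1 < b.1))) x acc) acc).map (fun p => p.2.1)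
      = (l.map (fun p => p.2.1)).foldl
          (fun acc x => PySem.List.insertBy (fun a b => decide (k a < k b)) x acc)
          (acc.map (fun p => p.2.1)) := by
  intro l
  induction l with
  | nil => intro acc _ _ _ _; rfl
  | cons x xs ih =>
    intro acc hl hacc hidx hpw
    simp only [List.foldl_cons, List.map_cons]
    rw [← insert_proj k x acc (hl x (by simp)) hacc (fun y hy => hidx y hy x (by simp))]
    apply ih
    · exact fun z hz => hl z (by simp [hz])
    · intro y hy
      rcases (PySem.List.mem_insertBy _ _ _ _).mp hy with h | h
      · subst h; exact hl y (by simp)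
      · exact hacc y h
    · intro y hy z hz
      rcases (PySem.List.mem_insertBy _ _ _ _).mp hy with h | h
      · subst h; exact (List.pairwise_cons.mp hpw).1 z hz
      · exact hidx y h z (by simp [hz])
    · exact (List.pairwise_cons.mp hpw).2

-- ===== VERDICT (by name: the statement is the Claim_ definition above) =====
theorem sortJumbled_spec : Claim_equal_sortJumbled := by
  intro mapping nums _hdom hpre
  unfold Spec_sortJumbled sortJumbled sortJumbled_alt
  set k := sortJumbledKey mapping with hk
  set idx := (PySem.List.enumerate nums).map (fun p => (p.1, p.2, sortJumbledGMV mapping p.2)) with hidx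
  have hl : ∀ z ∈ idx, z.2.2 = k z.2.1 := by
    intro z hz
    rcases List.mem_map.mp (hidx ▸ hz) with ⟨p, hp, rfl⟩
    have hnn : 0 ≤ p.2 := by
      rcases (PySem.List.mem_enumerate_iff nums 0 p).mp hp with ⟨j, hj, rfl⟩
      exact (hpre nums[j] (List.mem_of_getElem rfl)).1
    exact gmv_eq_key mapping p.2 hnn
  have hpw : idx.Pairwise (fun a b => a.1 < b.1) := by
    rw [hidx]
    exact (PySem.List.pairwise_lt_enumerate nums 0).map _ (fun a b h => h)
  have hproj : idx.map (fun p => p.2.1) = nums := by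
    rw [hidx, List.map_map]
    exact PySem.List.map_snd_enumerate nums 0
  rw [PySem.List.sorted_eq_foldl_insertBy]
  simp only [PySem.List.sorted2, Bool.false_eq_true, if_false]
  have := foldl_proj k idx [] hl (by simp) (by simp) hpw
  simp only [List.map_nil] at this
  rw [this, hproj]
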